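-- pv_equiv track=rewrite | github.com/minhphuc477/KLTN | src/core/definitions.py | _expand_node_fragment
-- ===== SOURCE A (Python) =====
-- from typing import Dict, Set, Iterable, List
--
-- KNOWN_NODE_LABEL_TOKENS: Set[str] = {
--     's', 'S', 't', 'b', 'e', 'k', 'K', 'I', 'i', 'p', 'm', 'S1',
-- }
--
-- NODE_LABEL_ALIASES: Dict[str, List[str]] = {
--     'start': ['S'],
--     'triforce': ['t'],
--     'goal': ['t'],
--     'boss': ['b'],
--     'enemy': ['e'],
--     'key': ['k'],
--     'small_key': ['k'],
--     'boss_key': ['K'],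
--     'item': ['i'],
--     'minor_item': ['i'],
--     'macro_item': ['I'],
--     'key_item': ['I'],
--     'puzzle': ['p'],
--     'miniboss': ['m'],
--     'mini_boss': ['m'],
--     # Compact labels observed in VGLC files.
--     'ei': ['e', 'i'],
--     'ep': ['e', 'p'],
-- }
--
-- def _expand_node_fragment(fragment: str) -> List[str]:
--     """
--     Expand one node label fragment into canonical tokens.
--
--     Handles:
--     - direct codes: e, k, p, ...
--     - aliases: enemy -> e
--     - compact forms: ei -> e,i
--     """
--     frag = str(fragment or '').strip()
--     if not frag:
--         return []
--     if frag in KNOWN_NODE_LABEL_TOKENS: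
--         return [frag]
--     if frag in NODE_LABEL_ALIASES:
--         return NODE_LABEL_ALIASES[frag]
--
--     low = frag.lower()
--     if low in NODE_LABEL_ALIASES:
--         return NODE_LABEL_ALIASES[low]
--
--     # Greedy decomposition for compact forms (e.g., "ei", "ep", "eip").
--     ordered = sorted(KNOWN_NODE_LABEL_TOKENS, key=len, reverse=True)
--     remaining = frag
--     pieces: List[str] = []
--     while remaining:
--         matched = False
--         for tok in ordered:
--             if remaining.startswith(tok):
--                 pieces.append(tok)
--                 remaining = remaining[len(tok):]
--                 matched = True
--                 break
--         if not matched: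
--             # Not decomposable into known codes; keep raw fragment.
--             return [frag]
--     return pieces
-- ===== SOURCE B (Python) =====
-- from typing import Dict, Set, List
--
-- KNOWN_NODE_LABEL_TOKENS: Set[str] = {
--     's', 'S', 't', 'b', 'e', 'k', 'K', 'I', 'i', 'p', 'm', 'S1',
-- }
--
-- NODE_LABEL_ALIASES: Dict[str, List[str]] = {
--     'start': ['S'],
--     'triforce': ['t'],
--     'goal': ['t'],
--     'boss': ['b'],
--     'enemy': ['e'],
--     'key': ['k'],
--     'small_key': ['k'],
--     'boss_key': ['K'],
--     'item': ['i'],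
--     'minor_item': ['i'],
--     'macro_item': ['I'],
--     'key_item': ['I'],
--     'puzzle': ['p'],
--     'miniboss': ['m'],
--     'mini_boss': ['m'],
--     'ei': ['e', 'i'],
--     'ep': ['e', 'p'],
-- }
--
-- _SINGLE_CHAR_TOKENS = "sStbekKIipm"
--
-- def _expand_node_fragment(fragment: str) -> List[str]:
--     """Expand one node label fragment into canonical tokens (single char scan)."""
--     frag = str(fragment or '').strip()
--     if not frag:
--         return []
--     if frag in KNOWN_NODE_LABEL_TOKENS:
--         return [frag]
--     if frag in NODE_LABEL_ALIASES:
--         return NODE_LABEL_ALIASES[frag]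
--     low = frag.lower()
--     if low in NODE_LABEL_ALIASES:
--         return NODE_LABEL_ALIASES[low]
--
--     # Single left-to-right character scan: the only multi-char token is 'S1',
--     # recognised by a one-character lookahead; everything else is a 1-char code.
--     pieces: List[str] = []
--     i = 0
--     n = len(frag)
--     while i < n:
--         c = frag[i]
--         if c == 'S' and i + 1 < n and frag[i + 1] == '1':
--             pieces.append('S1')
--             i += 2
--         elif c in _SINGLE_CHAR_TOKENS:
--             pieces.append(c)
--             i += 1
--         else:
--             return [frag]
--     return pieces
-- ===== Notes on version B (the rewrite author's own statement) =====
-- stated objective: alternative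
-- what changed: Replaces A's greedy while-loop, which retries all 12 sorted tokens via startswith and slicing at each position, with a single left-to-right character scan using a one-character lookahead for the sole two-character token.
import Mathlib
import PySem

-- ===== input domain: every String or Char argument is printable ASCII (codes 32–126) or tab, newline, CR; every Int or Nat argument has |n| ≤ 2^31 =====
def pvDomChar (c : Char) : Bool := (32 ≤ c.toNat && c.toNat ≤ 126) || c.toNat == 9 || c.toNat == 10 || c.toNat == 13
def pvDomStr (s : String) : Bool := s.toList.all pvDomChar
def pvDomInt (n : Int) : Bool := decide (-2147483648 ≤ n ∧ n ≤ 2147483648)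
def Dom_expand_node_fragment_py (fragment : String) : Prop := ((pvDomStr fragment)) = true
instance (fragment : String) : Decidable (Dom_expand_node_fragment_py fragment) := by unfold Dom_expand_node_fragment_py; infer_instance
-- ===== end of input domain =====

-- B replaces the greedy try-all-tokens loop with a single character scan with one-char lookahead (alternative, single-pass structure).

-- ===== PORT A =====
def pvKnownTokens : PySem.Set String :=
  PySem.Set.ofList ["s", "S", "t", "b", "e", "k", "K", "I", "i", "p", "m", "S1"]

def pvAliases : PySem.Dict String (List String) :=
  PySem.Dict.ofList [("start", ["S"]), ("triforce", ["t"]), ("goal", ["t"]),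
    ("boss", ["b"]), ("enemy", ["e"]), ("key", ["k"]), ("small_key", ["k"]),
    ("boss_key", ["K"]), ("item", ["i"]), ("minor_item", ["i"]),
    ("macro_item", ["I"]), ("key_item", ["I"]), ("puzzle", ["p"]),
    ("miniboss", ["m"]), ("mini_boss", ["m"]), ("ei", ["e", "i"]), ("ep", ["e", "p"])]

-- ordered = sorted(KNOWN_NODE_LABEL_TOKENS, key=len, reverse=True); the result of the
-- greedy loop does not depend on the (hash) order of equal-length tokens, since single
-- characters are pairwise distinct, so sorting the insertion-ordered Set is exact.
def pvOrdered : List String :=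
  PySem.List.sorted pvKnownTokens (fun t => PySem.Str.len t) true

-- inner 'for tok in ordered: if remaining.startswith(tok): … break'
def pvFirstTok (ordered : List String) (remaining : List Char) : Option String :=
  match ordered with
  | [] => none
  | tok :: rest =>
    if PySem.Chars.startswith remaining tok.toList then some tok
    else pvFirstTok rest remaining

lemma pvFirstTok_mem {ordered : List String} {remaining : List Char} {tok : String}
    (h : pvFirstTok ordered remaining = some tok) : tok ∈ ordered := by
  induction ordered with
  | nil => simp [pvFirstTok] at h
  | cons t rest ih =>
    simp only [pvFirstTok] at h
    split at h
    · simp_all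
    · exact List.mem_cons_of_mem _ (ih h)

-- while remaining: … (each matched token is nonempty, so remaining shrinks)
def pvGreedy (frag : String) (remaining : List Char) (pieces : List String) : List String :=
  match remaining with
  | [] => pieces
  | c :: cs =>
    match h : pvFirstTok pvOrdered (c :: cs) with
    | none => [frag]
    | some tok => pvGreedy frag ((c :: cs).drop tok.toList.length) (pieces ++ [tok])
termination_by remaining.length
decreasing_by
  have hm := pvFirstTok_mem h
  have hord : pvOrdered = ["S1", "s", "S", "t", "b", "e", "k", "K", "I", "i", "p", "m"] := by decide
  rw [hord] at hm
  have h1 : 1 ≤ tok.toList.length := by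
    simp only [List.mem_cons, List.not_mem_nil, or_false] at hm
    rcases hm with rfl | rfl | rfl | rfl | rfl | rfl | rfl | rfl | rfl | rfl | rfl | rfl <;> decide
  simp only [List.length_drop, List.length_cons]
  omega

def expand_node_fragment_py (fragment : String) : List String :=
  let frag := PySem.Str.strip fragment
  if frag = "" then []
  else if PySem.Set.contains pvKnownTokens frag then [frag]
  else
    match PySem.Dict.get? pvAliases frag with
    | some v => v
    | none =>
      let low := PySem.Str.lower frag
      match PySem.Dict.get? pvAliases low with
      | some v => v
      | none => pvGreedy frag frag.toList []

-- ===== PORT B =====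
def pvSingles : List Char := ['s', 'S', 't', 'b', 'e', 'k', 'K', 'I', 'i', 'p', 'm']

-- single left-to-right scan with a one-char lookahead for 'S1'; none = not decomposable
def pvScan (cs : List Char) : Option (List String) :=
  match cs with
  | [] => some []
  | c :: rest =>
    if c = 'S' ∧ rest.head? = some '1' then
      (pvScan rest.tail).map (fun ts => "S1" :: ts)
    else if c ∈ pvSingles then
      (pvScan rest).map (fun ts => String.ofList [c] :: ts)
    else none
termination_by cs.length
decreasing_by
  · simp only [List.length_tail, List.length_cons]
    omega
  · simp

def expand_node_fragment_py_alt (fragment : String) : List String :=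
  let frag := PySem.Str.strip fragment
  if frag = "" then []
  else if PySem.Set.contains pvKnownTokens frag then [frag]
  else
    match PySem.Dict.get? pvAliases frag with
    | some v => v
    | none =>
      match PySem.Dict.get? pvAliases (PySem.Str.lower frag) with
      | some v => v
      | none =>
        match pvScan frag.toList with
        | some ts => ts
        | none => [frag]

-- ===== PRECONDITION & SPEC =====
def Spec_expand_node_fragment_py (fragment : String) (out : List String) : Prop := out = expand_node_fragment_py_alt fragment
instance (fragment : String) (out : List String) : Decidable (Spec_expand_node_fragment_py fragment out) := by unfold Spec_expand_node_fragment_py; infer_instance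

-- ===== CLAIM (what is proved, stated in full; the proofs are below) =====
def Claim_equal_expand_node_fragment_py : Prop := ∀ (fragment : String), Dom_expand_node_fragment_py fragment → Spec_expand_node_fragment_py fragment (expand_node_fragment_py fragment)

-- ===== LEMMAS AND PROOFS =====

lemma pvOrdered_eq :
    pvOrdered = ["S1", "s", "S", "t", "b", "e", "k", "K", "I", "i", "p", "m"] := by decide

-- what the inner for-loop of A finds at the head of the input
lemma firstTok_eq (c : Char) (rest : List Char) :
    pvFirstTok pvOrdered (c :: rest) =
      if c = 'S' ∧ rest.head? = some '1' then some "S1"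
      else if c ∈ pvSingles then some (String.ofList [c])
      else none := by
  rw [pvOrdered_eq]
  by_cases h1 : c = 'S' ∧ rest.head? = some '1'
  · obtain ⟨rfl, hh⟩ := h1
    cases rest with
    | nil => simp at hh
    | cons r rs =>
      simp only [List.head?_cons, Option.some.injEq] at hh
      subst hh
      simp [pvFirstTok, PySem.Chars.startswith, List.isPrefixOf]
  · by_cases h2 : c ∈ pvSingles
    · simp only [pvSingles, List.mem_cons, List.not_mem_nil, or_false] at h2
      rcases h2 with rfl | rfl | rfl | rfl | rfl | rfl | rfl | rfl | rfl | rfl | rfl <;>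
        simp_all [pvFirstTok, PySem.Chars.startswith, pvSingles] <;>
        (cases rest with
         | nil => simp
         | cons r rs => simp_all [List.isPrefixOf, eq_comm])
    · have h2' : c ≠ 's' ∧ c ≠ 'S' ∧ c ≠ 't' ∧ c ≠ 'b' ∧ c ≠ 'e' ∧ c ≠ 'k' ∧ c ≠ 'K' ∧
          c ≠ 'I' ∧ c ≠ 'i' ∧ c ≠ 'p' ∧ c ≠ 'm' := by
        simp only [pvSingles, List.mem_cons, List.not_mem_nil, or_false] at h2
        push Not at h2
        exact h2
      obtain ⟨n1, n2, n3, n4, n5, n6, n7, n8, n9, n10, n11⟩ := h2'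
      simp [pvFirstTok, PySem.Chars.startswith, List.isPrefixOf, h1, h2,
        Ne.symm n1, Ne.symm n2, Ne.symm n3, Ne.symm n4, Ne.symm n5, Ne.symm n6,
        Ne.symm n7, Ne.symm n8, Ne.symm n9, Ne.symm n10, Ne.symm n11]

lemma greedy_eq_scan (n : Nat) : ∀ (rem : List Char), rem.length ≤ n →
    ∀ (frag : String) (pieces : List String),
    pvGreedy frag rem pieces =
      match pvScan rem with
      | some ts => pieces ++ ts
      | none => [frag] := by
  induction n with
  | zero =>
    intro rem h frag pieces
    have : rem = [] := List.eq_nil_of_length_eq_zero (Nat.le_zero.mp h)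
    subst this
    simp [pvGreedy, pvScan]
  | succ n ih =>
    intro rem hlen frag pieces
    match rem with
    | [] => simp [pvGreedy, pvScan]
    | c :: rest =>
      rw [pvGreedy.eq_def]
      simp only []
      by_cases h1 : c = 'S' ∧ rest.head? = some '1'
      · obtain ⟨rfl, hh⟩ := h1
        cases rest with
        | nil => simp at hh
        | cons r rs =>
          simp only [List.head?_cons, Option.some.injEq] at hh
          subst hh
          split
          · next heq =>
            rw [firstTok_eq] at heq
            simp at heq
          · next tok heq =>
            rw [firstTok_eq] at heq
            simp only [List.head?_cons, and_self, if_pos, Option.some.injEq] at heq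
            subst heq
            have h2 : ("S1".toList.length) = 2 := by decide
            rw [h2, List.drop_succ_cons, List.drop_succ_cons, List.drop_zero]
            have hrs : rs.length ≤ n := by
              simp only [List.length_cons] at hlen; omega
            rw [ih rs hrs frag (pieces ++ ["S1"])]
            conv_rhs => rw [pvScan.eq_def]
            cases hs : pvScan rs <;> simp [hs]
      · by_cases h2 : c ∈ pvSingles
        · split
          · next heq =>
            rw [firstTok_eq, if_neg h1, if_pos h2] at heq
            simp at heq
          · next tok heq =>
            rw [firstTok_eq, if_neg h1, if_pos h2] at heq
            simp only [Option.some.injEq] at heq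
            subst heq
            have h3 : ((String.ofList [c]).toList.length) = 1 := by simp
            rw [h3, List.drop_succ_cons, List.drop_zero]
            have hrest : rest.length ≤ n := by
              simp only [List.length_cons] at hlen; omega
            rw [ih rest hrest frag (pieces ++ [String.ofList [c]])]
            conv_rhs => rw [pvScan.eq_def]
            cases hs : pvScan rest <;> simp [hs, h1, h2]
        · split
          · next heq =>
            rw [pvScan.eq_def]
            simp [h1, h2]
          · next tok heq =>
            rw [firstTok_eq, if_neg h1, if_neg h2] at heq
            simp at heq

-- ===== VERDICT (by name: the statement is the Claim_ definition above) =====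
theorem expand_node_fragment_py_spec : Claim_equal_expand_node_fragment_py := by
  intro fragment _
  show expand_node_fragment_py fragment = expand_node_fragment_py_alt fragment
  unfold expand_node_fragment_py expand_node_fragment_py_alt
  dsimp only []
  split
  · rfl
  · split
    · rfl
    · split
      · rfl
      · split
        · rfl
        · rw [greedy_eq_scan ((PySem.Str.strip fragment).toList.length) _ le_rfl]
          cases hs : pvScan (PySem.Str.strip fragment).toList <;> simp [hs]
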